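-- pv_equiv track=rewrite | github.com/ClaireRuysschaert/AdventOfCode2025 | DayOne/day_one.py | get_total_distance
-- ===== SOURCE A (Python) =====
-- from typing import List, Tuple
--
-- def get_total_distance(left_line: List[int], right_line: List[int]) -> int:
--     """
--     Get the total distance of the two lines.
--     """
--     total_distance = 0
--
--     while len(left_line) > 0:
--         smallest_left = min(left_line)
--         smallest_right = min(right_line)
--
--         if smallest_left <= smallest_right:
--             total_distance += smallest_right - smallest_left
--         else:
--             total_distance += smallest_left - smallest_right
--
--         left_line.remove(smallest_left)
--         right_line.remove(smallest_right)
--     return total_distance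
-- ===== SOURCE B (Python) =====
-- def get_total_distance(left_line, right_line):
--     """
--     Get the total distance of the two lines.
--     """
--     return sum(abs(a - b) for a, b in zip(sorted(left_line), sorted(right_line)))
-- ===== Notes on version B (the rewrite author's own statement) =====
-- stated objective: faster
-- what changed: Replaces the repeated min-scan-and-remove loop (and its list mutation) by sorting both lists once and summing absolute differences of aligned elements.
import Mathlib
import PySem

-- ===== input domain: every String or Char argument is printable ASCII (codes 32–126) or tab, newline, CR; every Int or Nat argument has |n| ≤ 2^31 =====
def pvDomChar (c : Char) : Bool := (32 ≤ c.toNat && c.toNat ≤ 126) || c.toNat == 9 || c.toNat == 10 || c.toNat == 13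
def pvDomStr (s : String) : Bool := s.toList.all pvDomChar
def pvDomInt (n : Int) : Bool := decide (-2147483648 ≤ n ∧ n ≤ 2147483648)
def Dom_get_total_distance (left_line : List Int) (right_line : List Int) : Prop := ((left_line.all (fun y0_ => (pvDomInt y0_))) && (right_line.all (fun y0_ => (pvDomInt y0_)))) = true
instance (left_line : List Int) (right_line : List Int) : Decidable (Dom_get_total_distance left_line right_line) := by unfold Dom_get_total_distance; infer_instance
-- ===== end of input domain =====

-- B sorts both lists once and sums aligned absolute differences instead of A's repeated
-- min-scan-and-remove loop; equivalence is about the RETURN value only (A mutates both argument lists, B does not).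

-- ===== PORT A =====
def gtdGo : Nat → List Int → List Int → Int → Int
  | 0, _, _, acc => acc
  | fuel+1, l, r, acc =>
    match PySem.List.min? l (fun x => x), PySem.List.min? r (fun x => x) with
    | some sl, some sr =>
        let acc' := if sl ≤ sr then acc + (sr - sl) else acc + (sl - sr)
        gtdGo fuel ((PySem.List.remove? l sl).getD l) ((PySem.List.remove? r sr).getD r) acc'
    | _, _ => acc  -- min() of an empty list: Python raises ValueError; excluded by Pre_

def get_total_distance (left_line : List Int) (right_line : List Int) : Int :=
  gtdGo left_line.length left_line right_line 0

-- ===== PORT B =====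
def get_total_distance_alt (left_line : List Int) (right_line : List Int) : Int :=
  ((PySem.List.sorted left_line (fun x => x) false).zip
    (PySem.List.sorted right_line (fun x => x) false)).foldl
      (fun acc p => acc + |p.1 - p.2|) 0

-- ===== PRECONDITION & SPEC =====
-- Pre_ excludes exactly the inputs where A raises ValueError (left longer than right: min() of empty list).
def Pre_get_total_distance (left_line : List Int) (right_line : List Int) : Prop :=
  left_line.length ≤ right_line.length
instance (left_line : List Int) (right_line : List Int) : Decidable (Pre_get_total_distance left_line right_line) := by unfold Pre_get_total_distance; infer_instance
def pvWitness_get_total_distance : List Int × List Int := ([3, 1, 2], [4, 0, 5])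

def Spec_get_total_distance (left_line : List Int) (right_line : List Int) (out : Int) : Prop := out = get_total_distance_alt left_line right_line
instance (left_line : List Int) (right_line : List Int) (out : Int) : Decidable (Spec_get_total_distance left_line right_line out) := by unfold Spec_get_total_distance; infer_instance

-- ===== CLAIM (what is proved, stated in full; the proofs are below) =====
def Claim_equal_get_total_distance : Prop := ∀ (left_line : List Int) (right_line : List Int), Dom_get_total_distance left_line right_line → Pre_get_total_distance left_line right_line → Spec_get_total_distance left_line right_line (get_total_distance left_line right_line)

-- ===== LEMMAS AND PROOFS =====

-- head of sorted = the min value; the rest = sorted of the erase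
lemma sorted_cons_min (l : List Int) (m : Int)
    (hm : PySem.List.min? l (fun x => x) = some m) :
    PySem.List.sorted l (fun x => x) false = m :: PySem.List.sorted (l.erase m) (fun x => x) false := by
  have hmem : m ∈ l := PySem.List.min?_mem hm
  have hmin : ∀ y ∈ l, m ≤ y := fun y hy => PySem.List.min?_isMin hm y hy
  apply PySem.List.sorted_id_eq_of_perm_of_pairwise
  · exact ((PySem.List.sorted_perm _ _ _).cons m).trans (List.perm_cons_erase hmem).symm
  · refine List.pairwise_cons.mpr ⟨?_, ?_⟩
    · intro y hy
      exact hmin y (l.erase_subset ((PySem.List.mem_sorted _ _ _ _).mp hy))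
    · have := PySem.List.sorted_pairwise (xs := l.erase m) (key := fun x => x)
      exact this

lemma foldl_abs_shift (xs : List (Int × Int)) (acc : Int) :
    xs.foldl (fun a p => a + |p.1 - p.2|) acc = acc + xs.foldl (fun a p => a + |p.1 - p.2|) 0 := by
  induction xs generalizing acc with
  | nil => simp
  | cons x t ih => simp only [List.foldl_cons]; rw [ih, ih (0 + _)]; ring

lemma gtdGo_eq (n : Nat) : ∀ (l r : List Int) (acc : Int), l.length = n → n ≤ r.length →
    gtdGo n l r acc = acc + get_total_distance_alt l r := by
  induction n with
  | zero =>
    intro l r acc hl _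
    have : l = [] := List.eq_nil_of_length_eq_zero hl
    subst this
    simp [gtdGo, get_total_distance_alt, PySem.List.sorted]
  | succ n ih =>
    intro l r acc hl hr
    have hlne : l ≠ [] := by intro h; subst h; simp at hl
    have hrne : r ≠ [] := by intro h; subst h; simp at hr
    obtain ⟨sl, hsl⟩ := Option.ne_none_iff_exists'.mp
      (fun h => hlne ((PySem.List.min?_eq_none_iff l (fun x => x)).mp h))
    obtain ⟨sr, hsr⟩ := Option.ne_none_iff_exists'.mp
      (fun h => hrne ((PySem.List.min?_eq_none_iff r (fun x => x)).mp h))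
    have hslmem : sl ∈ l := PySem.List.min?_mem hsl
    have hsrmem : sr ∈ r := PySem.List.min?_mem hsr
    have hrl : PySem.List.remove? l sl = some (l.erase sl) :=
      PySem.List.remove?_eq_some_erase l sl hslmem
    have hrr : PySem.List.remove? r sr = some (r.erase sr) :=
      PySem.List.remove?_eq_some_erase r sr hsrmem
    have hlen : (l.erase sl).length = n := by
      rw [List.length_erase_of_mem hslmem, hl]
      omega
    have hrlen : n ≤ (r.erase sr).length := by
      rw [List.length_erase_of_mem hsrmem]
      omega
    have step : gtdGo (n+1) l r acc
        = gtdGo n (l.erase sl) (r.erase sr)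
            (if sl ≤ sr then acc + (sr - sl) else acc + (sl - sr)) := by
      simp [gtdGo, hsl, hsr, hrl, hrr]
    rw [step, ih _ _ _ hlen hrlen]
    unfold get_total_distance_alt
    rw [sorted_cons_min l sl hsl, sorted_cons_min r sr hsr]
    simp only [List.zip_cons_cons, List.foldl_cons]
    rw [foldl_abs_shift, foldl_abs_shift (acc := 0 + |sl - sr|)]
    rcases le_or_gt sl sr with h | h
    · rw [abs_of_nonpos (by omega), if_pos h]; ring
    · rw [abs_of_pos (by omega), if_neg (not_le.mpr h)]; ring

-- ===== VERDICT (by name: the statement is the Claim_ definition above) =====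
theorem get_total_distance_spec : Claim_equal_get_total_distance := by
  intro l r _ hpre
  unfold Spec_get_total_distance get_total_distance
  rw [gtdGo_eq l.length l r 0 rfl hpre]
  ring
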